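-- pv_equiv track=rewrite | github.com/pypi-data/pypi-mirror-374 | packages/commit-for-free/commit_for_free-1.1.5-py3-none-any.whl/c4f/_purifier.py | _extract_type_without_scope
-- ===== SOURCE A (Python) =====
-- from typing import Optional
--
-- def _extract_type_without_scope(
--     message: str, valid_types: list[str]
-- ) -> Optional[str]:
--     """Extract commit type from a message without scope format.
--
--     Checks if the message starts with a valid type followed by a colon.
--
--     Args:
--         message: The message to analyze.
--         valid_types: List of valid commit types to check against.
--
--     Returns:
--         The extracted commit type if found, otherwise None.
--     """
--     lower_message = message.lower()
--     for commit_type in valid_types: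
--         if lower_message.startswith((f"{commit_type}:", f"{commit_type} :")):
--             return commit_type
--     return None
-- ===== SOURCE B (Python) =====
-- from typing import Optional
--
--
-- def _extract_type_without_scope(
--     message: str, valid_types: list[str]
-- ) -> Optional[str]:
--     """Parse the text before the first colon and look it up in the set of
--     valid types, allowing one space before the colon ("type :")."""
--     prefix, sep, _ = message.lower().partition(":")
--     if not sep:
--         return None
--     types = set(valid_types)
--     if prefix in types:
--         return prefix
--     if prefix.endswith(" ") and prefix[:-1] in types:
--         return prefix[:-1]
--     return None
-- ===== Notes on version B (the rewrite author's own statement) =====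
-- stated objective: idiomatic
-- what changed: Instead of scanning every valid type with two startswith checks, B parses the message once (partition at the first colon), then does set lookups of the before-colon prefix and of the prefix minus one trailing space; Pre_ excludes inputs where a type containing a ':' itself prefixes the lowercased message (A's startswith matches across the first colon, B's parse stops there) and lists containing both a type and that same type plus a trailing space (which of the two A returns is an accident of list order).
-- outside the precondition, e.g. on _extract_type_without_scope('a:b: x', ['a:b']): A returns 'a:b', B returns None; on _extract_type_without_scope('feat :x', ['feat', 'feat ']): A returns 'feat', B returns 'feat '
import Mathlib
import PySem

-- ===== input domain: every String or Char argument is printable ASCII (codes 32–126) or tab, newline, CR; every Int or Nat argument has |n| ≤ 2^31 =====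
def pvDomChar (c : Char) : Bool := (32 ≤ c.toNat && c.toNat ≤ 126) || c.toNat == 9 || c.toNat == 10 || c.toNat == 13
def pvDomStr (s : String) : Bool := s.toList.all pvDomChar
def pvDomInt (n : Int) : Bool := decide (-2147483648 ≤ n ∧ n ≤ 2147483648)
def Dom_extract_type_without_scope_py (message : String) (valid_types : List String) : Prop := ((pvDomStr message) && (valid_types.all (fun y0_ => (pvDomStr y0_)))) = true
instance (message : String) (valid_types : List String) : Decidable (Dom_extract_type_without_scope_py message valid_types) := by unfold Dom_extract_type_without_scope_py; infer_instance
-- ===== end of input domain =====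

-- B parses the message once at its first colon and looks the pre up in a set,
-- instead of A's per-type double-startswith scan (objective: idiomatic).

-- ===== PORT A =====
-- the 'for commit_type in valid_types: if lower_message.startswith((f"{c}:", f"{c} :")) …' loop
def pvGoA (lowerM : List Char) : List String → Option String
  | [] => none
  | c :: rest =>
    if PySem.Chars.startswith lowerM (c.toList ++ [':'])
       || PySem.Chars.startswith lowerM (c.toList ++ [' ', ':']) then some c
    else pvGoA lowerM rest

def extract_type_without_scope_py (message : String) (valid_types : List String) : Option String :=
  pvGoA (PySem.Chars.lower message.toList) valid_types

-- ===== PORT B =====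
def extract_type_without_scope_py_alt (message : String) (valid_types : List String) : Option String :=
  let m := PySem.Chars.lower message.toList
  -- partition(":"): the text before the first ':'; sep is empty iff there is no ':' (exact)
  let pre := m.takeWhile (fun ch => ch != ':')
  if ':' ∈ m then
    let types := PySem.Set.ofList valid_types
    if PySem.Set.contains types (String.ofList pre) then some (String.ofList pre)
    else if PySem.Chars.endswith pre [' ']
            && PySem.Set.contains types (String.ofList pre.dropLast) then
      some (String.ofList pre.dropLast)   -- pre[:-1]
    else none
  else none

-- ===== PRECONDITION & SPEC =====
-- Pre_ excludes inputs where a type CONTAINING a ':' actually prefixes the lowercased message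
-- (A's startswith then matches across the message's first colon, where B's parse stops) and
-- lists containing both a type and that same type plus one trailing space (which of the two A
-- returns then is an accident of list order; B always prefers the exact before-colon prefix).
def Pre_extract_type_without_scope_py (message : String) (valid_types : List String) : Prop :=
  ∀ t ∈ valid_types,
    (':' ∈ t.toList →
       PySem.Chars.startswith (PySem.Chars.lower message.toList) (t.toList ++ [':']) = false ∧
       PySem.Chars.startswith (PySem.Chars.lower message.toList) (t.toList ++ [' ', ':']) = false)
    ∧ (t ++ " ") ∉ valid_types
instance (message : String) (valid_types : List String) : Decidable (Pre_extract_type_without_scope_py message valid_types) := by unfold Pre_extract_type_without_scope_py; infer_instance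

def pvWitness_extract_type_without_scope_py : String × List String := ("Feat: add x", ["fix", "feat"])

def Spec_extract_type_without_scope_py (message : String) (valid_types : List String) (out : Option String) : Prop := out = extract_type_without_scope_py_alt message valid_types
instance (message : String) (valid_types : List String) (out : Option String) : Decidable (Spec_extract_type_without_scope_py message valid_types out) := by unfold Spec_extract_type_without_scope_py; infer_instance

-- ===== CLAIM (what is proved, stated in full; the proofs are below) =====
def Claim_equal_extract_type_without_scope_py : Prop := ∀ (message : String) (valid_types : List String), Dom_extract_type_without_scope_py message valid_types → Pre_extract_type_without_scope_py message valid_types → Spec_extract_type_without_scope_py message valid_types (extract_type_without_scope_py message valid_types)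

-- ===== LEMMAS AND PROOFS =====

theorem pv_takeWhile_colon (a w : List Char) (h : ':' ∉ a) :
    (a ++ ':' :: w).takeWhile (fun ch => ch != ':') = a := by
  induction a with
  | nil => simp
  | cons x xs ih =>
    simp only [List.mem_cons, not_or] at h
    simp [Ne.symm h.1, ih h.2]

theorem pv_match1 (p w c : List Char) (hc : ':' ∉ c) (hp : ':' ∉ p) :
    PySem.Chars.startswith (p ++ ':' :: w) (c ++ [':']) = true ↔ c = p := by
  rw [PySem.Chars.startswith_iff]
  constructor
  · rintro ⟨t, ht⟩
    have h2 : (c ++ [':']) ++ t = c ++ ':' :: t := by simp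
    rw [h2] at ht
    have := congrArg (List.takeWhile (fun ch => ch != ':')) ht
    rwa [pv_takeWhile_colon c t hc, pv_takeWhile_colon p w hp] at this
  · rintro rfl
    exact ⟨w, by simp⟩

theorem pv_match2 (p w c : List Char) (hc : ':' ∉ c) (hp : ':' ∉ p) :
    PySem.Chars.startswith (p ++ ':' :: w) (c ++ [' ', ':']) = true ↔ c ++ [' '] = p := by
  have h : c ++ [' ', ':'] = (c ++ [' ']) ++ [':'] := by simp
  rw [h, pv_match1 p w (c ++ [' ']) (by simp [hc]) hp]

theorem pv_no_colon_no_match (m c : List Char) (h : ':' ∉ m) :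
    PySem.Chars.startswith m (c ++ [':']) = false := by
  rw [Bool.eq_false_iff]
  intro hs
  rw [PySem.Chars.startswith_iff] at hs
  exact h (hs.mem (by simp))

theorem pvGoA_none (m : List Char) (vts : List String)
    (h : ∀ c ∈ vts, (PySem.Chars.startswith m (c.toList ++ [':'])
      || PySem.Chars.startswith m (c.toList ++ [' ', ':'])) = false) :
    pvGoA m vts = none := by
  induction vts with
  | nil => rfl
  | cons c rest ih =>
    rw [pvGoA, h c (by simp), if_neg (by simp)]
    exact ih (fun x hx => h x (by simp [hx]))

theorem pvGoA_some (m : List Char) (vts : List String) (r : String)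
    (hr : r ∈ vts)
    (h : ∀ c ∈ vts, (PySem.Chars.startswith m (c.toList ++ [':'])
      || PySem.Chars.startswith m (c.toList ++ [' ', ':'])) = true → c = r)
    (hm : (PySem.Chars.startswith m (r.toList ++ [':'])
      || PySem.Chars.startswith m (r.toList ++ [' ', ':'])) = true) :
    pvGoA m vts = some r := by
  induction vts with
  | nil => cases hr
  | cons c rest ih =>
    rw [pvGoA]
    by_cases hc : (PySem.Chars.startswith m (c.toList ++ [':'])
      || PySem.Chars.startswith m (c.toList ++ [' ', ':'])) = true
    · rw [if_pos hc, h c (by simp) hc]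
    · rw [if_neg hc]
      have hr' : r ∈ rest := by
        rcases List.mem_cons.1 hr with rfl | hr'
        · exact absurd hm hc
        · exact hr'
      exact ih hr' (fun x hx => h x (by simp [hx]))

theorem pv_contains_ofList (vts : List String) (x : String) :
    PySem.Set.contains (PySem.Set.ofList vts) x = true ↔ x ∈ vts := by
  simp [PySem.Set.contains, PySem.Set.mem_ofList]

theorem pv_mk_eq_iff (c : String) (p : List Char) : c = String.ofList p ↔ c.toList = p := by
  constructor
  · rintro rfl; simp
  · intro h; rw [← h, String.ofList_toList]

-- ===== VERDICT (by name: the statement is the Claim_ definition above) =====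
theorem extract_type_without_scope_py_spec : Claim_equal_extract_type_without_scope_py := by
  intro message valid_types _ hpre
  unfold Spec_extract_type_without_scope_py extract_type_without_scope_py extract_type_without_scope_py_alt
  set m := PySem.Chars.lower message.toList with hm
  by_cases hcol : ':' ∈ m
  · -- decompose m at the first colon
    set p := m.takeWhile (fun ch => ch != ':') with hpdef
    have hp : ':' ∉ p := by
      intro h
      have := List.mem_takeWhile_imp h
      simp at this
    have hdrop : m.dropWhile (fun ch => ch != ':') ≠ [] := by
      intro h
      have hmm : p = m := by
        conv_rhs => rw [← List.takeWhile_append_dropWhile (p := fun ch => ch != ':') (l := m)]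
        rw [h, List.append_nil, hpdef]
      exact hp (hmm ▸ hcol)
    obtain ⟨d, w, hdw⟩ : ∃ d w, m.dropWhile (fun ch => ch != ':') = d :: w := by
      cases hdd : m.dropWhile (fun ch => ch != ':') with
      | nil => exact absurd hdd hdrop
      | cons d w => exact ⟨d, w, rfl⟩
    have hd : d = ':' := by
      have := List.head?_dropWhile_not (p := fun ch => ch != ':') (l := m)
      rw [hdw] at this
      simpa using this
    have hsplit : m = p ++ ':' :: w := by
      conv_lhs => rw [← List.takeWhile_append_dropWhile (p := fun ch => ch != ':') (l := m)]
      rw [hdw, hd]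
    rw [if_pos hcol]
    -- characterize A's per-type match
    have hmatch : ∀ c ∈ valid_types,
        ((PySem.Chars.startswith m (c.toList ++ [':'])
          || PySem.Chars.startswith m (c.toList ++ [' ', ':'])) = true
         ↔ (':' ∉ c.toList ∧ (c.toList = p ∨ c.toList ++ [' '] = p))) := by
      intro c hcv
      by_cases hcc : ':' ∈ c.toList
      · obtain ⟨hf1, hf2⟩ := (hpre c hcv).1 hcc
        refine ⟨fun hmc => ?_, fun h => absurd hcc h.1⟩
        rw [hf1, hf2] at hmc
        simp at hmc
      · rw [Bool.or_eq_true, hsplit, pv_match1 p w c.toList hcc hp,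
          pv_match2 p w c.toList hcc hp]
        simp [hcc]
    by_cases h1 : PySem.Set.contains (PySem.Set.ofList valid_types) (String.ofList p) = true
    · rw [if_pos h1]
      have hpv : String.ofList p ∈ valid_types := (pv_contains_ofList _ _).1 h1
      apply pvGoA_some m valid_types (String.ofList p) hpv
      · intro c hcv hmc
        rcases ((hmatch c hcv).1 hmc).2 with hcp | hcp
        · exact (pv_mk_eq_iff c p).2 hcp
        · exfalso
          have : (c ++ " ") ∈ valid_types := by
            have : (c ++ " ").toList = p := by
              simpa using hcp
            rwa [(pv_mk_eq_iff _ p).2 this]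
          exact (hpre c hcv).2 this
      · exact (hmatch _ hpv).2 ⟨by simpa using hp, Or.inl (by simp)⟩
    · rw [if_neg h1]
      have hpnv : String.ofList p ∉ valid_types := fun h => h1 ((pv_contains_ofList _ _).2 h)
      by_cases h2 : (PySem.Chars.endswith p [' ']
          && PySem.Set.contains (PySem.Set.ofList valid_types) (String.ofList p.dropLast)) = true
      · rw [if_pos h2]
        rw [Bool.and_eq_true] at h2
        have hqv : String.ofList p.dropLast ∈ valid_types := (pv_contains_ofList _ _).1 h2.2
        have hends : p.dropLast ++ [' '] = p := by
          have := (PySem.Chars.endswith_iff _ _).1 h2.1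
          obtain ⟨a, ha⟩ := this
          rw [← ha]
          simp
        apply pvGoA_some m valid_types (String.ofList p.dropLast) hqv
        · intro c hcv hmc
          rcases ((hmatch c hcv).1 hmc).2 with hcp | hcp
          · exact absurd ((pv_mk_eq_iff c p).2 hcp ▸ hcv) hpnv
          · rw [pv_mk_eq_iff]
            have : c.toList ++ [' '] = p.dropLast ++ [' '] := by rw [hcp, hends]
            simpa using this
        · refine (hmatch _ hqv).2 ⟨?_, Or.inr ?_⟩
          · simpa using fun h => hp ((List.dropLast_sublist p).subset h)
          · have : (String.ofList p.dropLast).toList = p.dropLast := by simp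
            rw [this, hends]
      · rw [if_neg h2]
        apply pvGoA_none
        intro c hcv
        rw [Bool.eq_false_iff, Ne, hmatch c hcv]
        rintro ⟨-, hcp | hcp⟩
        · exact hpnv ((pv_mk_eq_iff c p).2 hcp ▸ hcv)
        · apply h2
          rw [Bool.and_eq_true]
          constructor
          · rw [PySem.Chars.endswith_iff _ _]
            exact ⟨c.toList, hcp⟩

          · rw [pv_contains_ofList]
            have : c.toList = p.dropLast := by rw [← hcp]; simp
            exact (pv_mk_eq_iff c _).2 this ▸ hcv
  · rw [if_neg hcol]
    apply pvGoA_none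
    intro c _
    have h1 := pv_no_colon_no_match m c.toList hcol
    have h2 : c.toList ++ [' ', ':'] = (c.toList ++ [' ']) ++ [':'] := by simp
    have h3 := pv_no_colon_no_match m (c.toList ++ [' ']) hcol
    rw [h2, h1, h3]
    rfl
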